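-- pv_equiv track=rewrite | github.com/Johnaconda/Johnaconda-ComfyUI-Custom-Nodes | sdxl_dual_merger.py | _scan_unet_ranges
-- ===== SOURCE A (Python) =====
-- from typing import Dict, Iterable, Callable, Optional, Tuple, List
--
-- def _scan_unet_ranges(keys: Iterable[str]) -> Tuple[int, int]:
--     max_in = -1
--     max_out = -1
--     for k in keys:
--         if "input_blocks." in k:
--             try:
--                 idx = int(k.split("input_blocks.")[1].split(".")[0])
--                 max_in = max(max_in, idx)
--             except Exception:
--                 pass
--         if "output_blocks." in k:
--             try:
--                 idx = int(k.split("output_blocks.")[1].split(".")[0])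
--                 max_out = max(max_out, idx)
--             except Exception:
--                 pass
--     return max_in, max_out
-- ===== SOURCE B (Python) =====
-- from typing import Iterable, Tuple, List
--
--
-- def _key_pair(k: str) -> Tuple[int, int]:
--     """Map one key to its (input, output) block contribution, -1 when absent."""
--     def part(marker: str) -> int:
--         if marker not in k:
--             return -1
--         try:
--             return max(-1, int(k.split(marker)[1].split(".")[0]))
--         except ValueError:
--             return -1
--     return part("input_blocks."), part("output_blocks.")
--
--
-- def _merge(p: Tuple[int, int], q: Tuple[int, int]) -> Tuple[int, int]:
--     return max(p[0], q[0]), max(p[1], q[1])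
--
--
-- def _reduce(pairs: List[Tuple[int, int]], lo: int, hi: int) -> Tuple[int, int]:
--     """Binary divide-and-conquer reduction of pairs[lo:hi] (hi - lo >= 1)."""
--     if hi - lo == 1:
--         return pairs[lo]
--     mid = (lo + hi) // 2
--     return _merge(_reduce(pairs, lo, mid), _reduce(pairs, mid, hi))
--
--
-- def _scan_unet_ranges(keys: Iterable[str]) -> Tuple[int, int]:
--     pairs = [_key_pair(k) for k in keys]
--     if not pairs:
--         return -1, -1
--     return _reduce(pairs, 0, len(pairs))
-- ===== Notes on version B (the rewrite author's own statement) =====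
-- stated objective: alternative
-- what changed: A threads a (max_in, max_out) accumulator through one sequential loop with inline try/except updates; B is a map-reduce: each key is mapped once to an independent (in,out) pair clamped at -1, and the pairs are combined by componentwise max in a recursive divide-and-conquer binary reduction tree (no running accumulator), correct because componentwise max is associative.
import Mathlib
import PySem

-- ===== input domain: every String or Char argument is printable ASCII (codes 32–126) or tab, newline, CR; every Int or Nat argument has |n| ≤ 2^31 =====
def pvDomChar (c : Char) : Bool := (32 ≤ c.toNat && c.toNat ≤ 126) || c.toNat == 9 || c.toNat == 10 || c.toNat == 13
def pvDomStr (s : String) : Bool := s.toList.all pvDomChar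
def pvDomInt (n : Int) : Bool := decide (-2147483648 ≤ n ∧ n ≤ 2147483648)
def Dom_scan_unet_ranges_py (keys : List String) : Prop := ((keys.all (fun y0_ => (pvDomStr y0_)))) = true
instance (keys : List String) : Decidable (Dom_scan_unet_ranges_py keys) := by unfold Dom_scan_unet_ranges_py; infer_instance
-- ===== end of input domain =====

-- B replaces A's sequential accumulator loop by a map-reduce: each key is mapped
-- to an independent (-1)-clamped (in, out) pair and the pairs are combined by
-- componentwise max in a divide-and-conquer binary reduction; objective: alternative.

-- ===== PORT A =====
-- one step of A's loop body; k.split(sep)[1] / [...][0] cannot raise under the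
-- 'in' guard, so the .getD defaults are never taken (split? is none only for sep = "")
def pvScanStepA (st : Int × Int) (k : String) : Int × Int :=
  let st1 :=
    if PySem.Str.isIn "input_blocks." k then
      match PySem.Int.ofStr?
          ((((PySem.Str.split? ((((PySem.Str.split? k "input_blocks.").getD []).getD 1 "")) ".").getD []).getD 0 "")) with
      | some idx => (max st.1 idx, st.2)
      | none => st
    else st
  if PySem.Str.isIn "output_blocks." k then
    match PySem.Int.ofStr?
        ((((PySem.Str.split? ((((PySem.Str.split? k "output_blocks.").getD []).getD 1 "")) ".").getD []).getD 0 "")) with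
    | some idx => (st1.1, max st1.2 idx)
    | none => st1
  else st1

def scan_unet_ranges_py (keys : List String) : Int × Int :=
  keys.foldl pvScanStepA (-1, -1)

-- ===== PORT B =====
-- part(marker) of _key_pair: -1 when marker absent or int() ValueError, else max(-1, idx)
def pvKeyOne (k marker : String) : Int :=
  if PySem.Str.isIn marker k then
    match PySem.Int.ofStr?
        ((((PySem.Str.split? ((((PySem.Str.split? k marker).getD []).getD 1 "")) ".").getD []).getD 0 "")) with
    | some idx => max (-1) idx
    | none => -1
  else -1

def pvKeyPair (k : String) : Int × Int :=
  (pvKeyOne k "input_blocks.", pvKeyOne k "output_blocks.")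

def pvMerge (p q : Int × Int) : Int × Int := (max p.1 q.1, max p.2 q.2)

-- _reduce(pairs, lo, hi): binary reduction of pairs[lo:hi]; always called with
-- lo < hi ≤ len, so the '≤ 1' guard and the getD default only make it total
def pvReduce (pairs : List (Int × Int)) (lo hi : Nat) : Int × Int :=
  if hi - lo ≤ 1 then pairs.getD lo (-1, -1)
  else
    let mid := (lo + hi) / 2
    pvMerge (pvReduce pairs lo mid) (pvReduce pairs mid hi)
  termination_by hi - lo
  decreasing_by all_goals omega

def scan_unet_ranges_py_alt (keys : List String) : Int × Int :=
  let pairs := keys.map pvKeyPair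
  if pairs.isEmpty then (-1, -1)
  else pvReduce pairs 0 pairs.length

-- ===== PRECONDITION & SPEC =====
def Spec_scan_unet_ranges_py (keys : List String) (out : Int × Int) : Prop := out = scan_unet_ranges_py_alt keys
instance (keys : List String) (out : Int × Int) : Decidable (Spec_scan_unet_ranges_py keys out) := by unfold Spec_scan_unet_ranges_py; infer_instance

-- ===== CLAIM (what is proved, stated in full; the proofs are below) =====
def Claim_equal_scan_unet_ranges_py : Prop := ∀ (keys : List String), Dom_scan_unet_ranges_py keys → Spec_scan_unet_ranges_py keys (scan_unet_ranges_py keys)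

-- ===== LEMMAS AND PROOFS =====

theorem pvKeyOne_ge (k marker : String) : -1 ≤ pvKeyOne k marker := by
  unfold pvKeyOne
  split_ifs
  · cases PySem.Int.ofStr?
        ((((PySem.Str.split? ((((PySem.Str.split? k marker).getD []).getD 1 "")) ".").getD []).getD 0 "")) with
    | none => simp
    | some i => simp
  · omega

-- A's loop step is merging in B's per-key pair, whenever the state is ≥ (-1,-1)
theorem pvScanStepA_eq (st : Int × Int) (k : String)
    (h1 : -1 ≤ st.1) (h2 : -1 ≤ st.2) :
    pvScanStepA st k = pvMerge st (pvKeyPair k) := by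
  unfold pvScanStepA pvMerge pvKeyPair pvKeyOne
  generalize PySem.Int.ofStr?
      ((((PySem.Str.split? ((((PySem.Str.split? k "input_blocks.").getD []).getD 1 "")) ".").getD []).getD 0 "")) = oi
  generalize PySem.Int.ofStr?
      ((((PySem.Str.split? ((((PySem.Str.split? k "output_blocks.").getD []).getD 1 "")) ".").getD []).getD 0 "")) = oo
  cases oi <;> cases oo <;> simp only [] <;> split_ifs <;>
    (refine Prod.ext ?_ ?_ <;> simp only [] <;> omega)

theorem pvFoldA_eq_foldMerge (keys : List String) (st : Int × Int)
    (h1 : -1 ≤ st.1) (h2 : -1 ≤ st.2) :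
    keys.foldl pvScanStepA st = (keys.map pvKeyPair).foldl pvMerge st := by
  induction keys generalizing st with
  | nil => rfl
  | cons k ks ih =>
    rw [List.map_cons, List.foldl_cons, List.foldl_cons, pvScanStepA_eq st k h1 h2]
    exact ih _ (le_trans h1 (le_max_left _ _)) (le_trans h2 (le_max_left _ _))

-- folding pvMerge preserves being componentwise ≥ -1
theorem pvFoldMerge_ge (l : List (Int × Int)) (a : Int × Int)
    (h1 : -1 ≤ a.1) (h2 : -1 ≤ a.2) :
    -1 ≤ (l.foldl pvMerge a).1 ∧ -1 ≤ (l.foldl pvMerge a).2 := by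
  induction l generalizing a with
  | nil => exact ⟨h1, h2⟩
  | cons x xs ih =>
    exact ih _ (le_trans h1 (le_max_left _ _)) (le_trans h2 (le_max_left _ _))

-- folding pvMerge from a state ≥ (-1,-1) over pairs ≥ (-1,-1) factors through (-1,-1)
theorem pvFoldMerge_init (l : List (Int × Int)) (a : Int × Int)
    (ha1 : -1 ≤ a.1) (ha2 : -1 ≤ a.2)
    (hl : ∀ p ∈ l, -1 ≤ p.1 ∧ -1 ≤ p.2) :
    l.foldl pvMerge a = pvMerge a (l.foldl pvMerge (-1, -1)) := by
  induction l generalizing a with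
  | nil =>
    simp only [List.foldl_nil, pvMerge]
    refine Prod.ext ?_ ?_ <;> dsimp only <;> omega
  | cons x xs ih =>
    have hx := hl x (by simp)
    have hxs : ∀ p ∈ xs, -1 ≤ p.1 ∧ -1 ≤ p.2 := fun p hp => hl p (by simp [hp])
    rw [List.foldl_cons, List.foldl_cons,
      ih (pvMerge a x) (le_trans ha1 (le_max_left _ _)) (le_trans ha2 (le_max_left _ _)) hxs,
      ih (pvMerge (-1, -1) x) (le_trans hx.1 (le_max_right _ _)) (le_trans hx.2 (le_max_right _ _)) hxs]
    generalize xs.foldl pvMerge (-1, -1) = m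
    simp only [pvMerge]
    refine Prod.ext ?_ ?_ <;> dsimp only <;> omega

-- pvReduce computes the left fold of pvMerge over the slice pairs[lo:hi]
theorem pvReduce_eq_fold (n : Nat) : ∀ (pairs : List (Int × Int)) (lo hi : Nat),
    hi - lo = n → lo < hi → hi ≤ pairs.length →
    (∀ p ∈ pairs, -1 ≤ p.1 ∧ -1 ≤ p.2) →
    pvReduce pairs lo hi = ((pairs.drop lo).take (hi - lo)).foldl pvMerge (-1, -1) := by
  induction n using Nat.strong_induction_on with
  | _ n ih =>
    intro pairs lo hi hn hlt hlen hall
    unfold pvReduce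
    by_cases h1 : hi - lo ≤ 1
    · have hone : hi - lo = 1 := by omega
      have hlo : lo < pairs.length := by omega
      rw [if_pos h1, hone, List.drop_eq_getElem_cons hlo]
      simp only [List.take_succ_cons, List.take_zero, List.foldl_cons, List.foldl_nil]
      have hp := hall pairs[lo] (List.getElem_mem hlo)
      rw [List.getD_eq_getElem _ _ hlo]
      simp only [pvMerge]
      refine Prod.ext ?_ ?_ <;> dsimp only <;> omega
    · rw [if_neg h1]
      dsimp only
      have hmid1 : lo < (lo + hi) / 2 := by omega
      have hmid2 : (lo + hi) / 2 < hi := by omega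
      rw [ih ((lo + hi) / 2 - lo) (by omega) pairs lo ((lo + hi) / 2) rfl hmid1 (by omega) hall,
        ih (hi - (lo + hi) / 2) (by omega) pairs ((lo + hi) / 2) hi rfl hmid2 hlen hall]
      -- split the slice at mid
      have hsplit : (pairs.drop lo).take (hi - lo)
          = (pairs.drop lo).take ((lo + hi) / 2 - lo)
            ++ (pairs.drop ((lo + hi) / 2)).take (hi - (lo + hi) / 2) := by
        have : hi - lo = ((lo + hi) / 2 - lo) + (hi - (lo + hi) / 2) := by omega
        rw [this, List.take_add]
        congr 1
        rw [List.drop_drop, show lo + ((lo + hi) / 2 - lo) = (lo + hi) / 2 from by omega]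
      rw [hsplit, List.foldl_append]
      have hmem : ∀ p ∈ (pairs.drop ((lo + hi) / 2)).take (hi - (lo + hi) / 2),
          -1 ≤ p.1 ∧ -1 ≤ p.2 := fun p hp =>
        hall p (List.mem_of_mem_drop (List.mem_of_mem_take hp))
      have hge := pvFoldMerge_ge ((pairs.drop lo).take ((lo + hi) / 2 - lo)) (-1, -1)
        (by norm_num) (by norm_num)
      rw [pvFoldMerge_init _ _ hge.1 hge.2 hmem]

-- ===== VERDICT (by name: the statement is the Claim_ definition above) =====
theorem scan_unet_ranges_py_spec : Claim_equal_scan_unet_ranges_py := by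
  intro keys _
  unfold Spec_scan_unet_ranges_py scan_unet_ranges_py scan_unet_ranges_py_alt
  cases keys with
  | nil => rfl
  | cons k ks =>
    dsimp only
    simp only [List.map_cons, List.isEmpty_cons, Bool.false_eq_true, if_false]
    have hall : ∀ p ∈ (pvKeyPair k :: ks.map pvKeyPair), -1 ≤ p.1 ∧ -1 ≤ p.2 := by
      intro p hp
      rw [← List.map_cons] at hp
      obtain ⟨x, _, rfl⟩ := List.mem_map.mp hp
      unfold pvKeyPair
      exact ⟨pvKeyOne_ge x "input_blocks.", pvKeyOne_ge x "output_blocks."⟩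
    have hred := pvReduce_eq_fold ((pvKeyPair k :: ks.map pvKeyPair).length - 0)
        (pvKeyPair k :: ks.map pvKeyPair) 0 (pvKeyPair k :: ks.map pvKeyPair).length rfl
        (Nat.succ_pos _) le_rfl hall
    rw [hred]
    simp only [List.drop_zero, Nat.sub_zero, List.take_length]
    rw [← List.map_cons]
    exact pvFoldA_eq_foldMerge _ _ (by norm_num) (by norm_num)
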